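-- pv_equiv track=rewrite | github.com/adhithyan15/coding-adventures | code/programs/python/unix-tools/echo_tool.py | process_escapes
-- ===== SOURCE A (Python) =====
-- ESCAPE_MAP: dict[str, str] = {
--     "\\": "\\",  # \\ -> literal backslash
--     "a": "\a",   # \a -> alert (bell)
--     "b": "\b",   # \b -> backspace
--     "f": "\f",   # \f -> form feed
--     "n": "\n",   # \n -> newline
--     "r": "\r",   # \r -> carriage return
--     "t": "\t",   # \t -> horizontal tab
-- }
--
-- def process_escapes(text: str) -> str:
--     r"""Interpret backslash escape sequences in the given text.
--
--     This function walks through the string character by character. When it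
--     encounters a backslash, it looks at the next character to decide what
--     to output:
--
--     - If the next character is in ESCAPE_MAP, output the mapped value.
--     - If the next character is '0', read up to 3 octal digits and output
--       the corresponding character (e.g., ``\\0101`` -> ``A``).
--     - If the next character is anything else, output the backslash and
--       the character as-is.
--
--     This manual parsing approach (rather than using str.translate or regex)
--     is deliberate: it matches the exact behavior of GNU echo, which
--     processes escapes left-to-right in a single pass.
--
--     Args:
--         text: The raw string potentially containing backslash sequences.
--
--     Returns:
--         A new string with escape sequences replaced by their values.
--     """
--     result: list[str] = []
--     i = 0
--     length = len(text)
--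
--     while i < length:
--         char = text[i]
--
--         if char != "\\":
--             # --- Normal character: just append it. ---
--             result.append(char)
--             i += 1
--             continue
--
--         # --- We found a backslash. Look at the next character. ---
--         if i + 1 >= length:
--             # Backslash at end of string — output it literally.
--             result.append("\\")
--             i += 1
--             continue
--
--         next_char = text[i + 1]
--
--         if next_char in ESCAPE_MAP:
--             # --- Simple escape: look up the replacement. ---
--             result.append(ESCAPE_MAP[next_char])
--             i += 2
--
--         elif next_char == "0":
--             # --- Octal escape: \0 followed by up to 3 octal digits. ---
--             # Examples:
--             #   \0    -> NUL (octal 0)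
--             #   \012  -> newline (octal 12 = decimal 10)
--             #   \0101 -> 'A' (octal 101 = decimal 65)
--             octal_digits = ""
--             j = i + 2  # Start after \0
--             while j < length and len(octal_digits) < 3 and text[j] in "01234567":
--                 octal_digits += text[j]
--                 j += 1
--             # Convert octal string to integer, then to character.
--             # If no digits follow \0, the value is 0 (NUL character).
--             octal_value = int(octal_digits, 8) if octal_digits else 0
--             result.append(chr(octal_value))
--             i = j
--
--         else:
--             # --- Unknown escape: output backslash + character as-is. ---
--             result.append("\\")
--             result.append(next_char)
--             i += 2
--
--     return "".join(result)
-- ===== SOURCE B (Python) =====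
-- def process_escapes(text: str) -> str:
--     """Single streaming pass: a small state machine over the characters.
--
--     States: 0 = normal, 1 = just saw a backslash, 2 = inside an octal
--     escape (val/nd accumulate the value and digit count). No indexing,
--     no lookahead, no inner loop; a flush at end of input handles a
--     trailing backslash or an unterminated octal escape.
--     """
--     _MAP = {"\\": "\\", "a": "\a", "b": "\b", "f": "\f",
--             "n": "\n", "r": "\r", "t": "\t"}
--     out = []
--     st = 0
--     val = 0
--     nd = 0
--     for ch in text:
--         if st == 0:
--             if ch == "\\":
--                 st = 1
--             else:
--                 out.append(ch)
--         elif st == 1: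
--             if ch in _MAP:
--                 out.append(_MAP[ch])
--                 st = 0
--             elif ch == "0":
--                 st = 2
--                 val = 0
--                 nd = 0
--             else:
--                 out.append("\\")
--                 out.append(ch)
--                 st = 0
--         else:
--             if nd < 3 and ch in "01234567":
--                 val = val * 8 + int(ch)
--                 nd += 1
--             else:
--                 out.append(chr(val))
--                 if ch == "\\":
--                     st = 1
--                 else:
--                     out.append(ch)
--                     st = 0
--     if st == 1:
--         out.append("\\")
--     elif st == 2:
--         out.append(chr(val))
--     return "".join(out)
-- ===== Notes on version B (the rewrite author's own statement) =====
-- stated objective: alternative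
-- what changed: Replaced A's index-walk with explicit lookahead (text[i+1]) and an inner octal-digit while loop by a single streaming state-machine fold over the characters (states normal / saw-backslash / in-octal) with an end-of-input flush.
import Mathlib
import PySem

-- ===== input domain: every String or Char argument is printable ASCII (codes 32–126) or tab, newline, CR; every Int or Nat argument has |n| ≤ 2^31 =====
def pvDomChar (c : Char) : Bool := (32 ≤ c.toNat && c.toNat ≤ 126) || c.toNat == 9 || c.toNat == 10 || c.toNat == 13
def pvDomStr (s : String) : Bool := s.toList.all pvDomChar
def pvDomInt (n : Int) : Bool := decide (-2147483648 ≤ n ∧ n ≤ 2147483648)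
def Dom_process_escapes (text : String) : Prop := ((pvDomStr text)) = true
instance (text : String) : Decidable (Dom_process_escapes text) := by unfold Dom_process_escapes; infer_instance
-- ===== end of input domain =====

-- B replaces A's index-walk with lookahead and inner octal loop by a single
-- streaming state-machine fold with an end-of-input flush (objective: alternative).

-- ===== PORT A =====

-- ESCAPE_MAP lookup: `next_char in ESCAPE_MAP` / `ESCAPE_MAP[next_char]` as one Option
def escMap (c : Char) : Option Char :=
  if c = '\\' then some '\\'
  else if c = 'a' then some (Char.ofNat 7)
  else if c = 'b' then some (Char.ofNat 8)
  else if c = 'f' then some (Char.ofNat 12)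
  else if c = 'n' then some '\n'
  else if c = 'r' then some (Char.ofNat 13)
  else if c = 't' then some '\t'
  else none

-- `text[j] in "01234567"`
def isOct (c : Char) : Bool := ['0','1','2','3','4','5','6','7'].contains c

-- int(octal_digits, 8) for a string of octal digits (exact: each digit is '0'..'7')
def octVal (v : Nat) (ds : List Char) : Nat := ds.foldl (fun a c => a * 8 + (c.toNat - 48)) v

-- A's inner while loop collecting up to 3 octal digits from index j.
-- (Python tracks j itself; the port returns the collected digits and the
-- caller resumes at i + 2 + digits.length, the same j.)
def octLoop (cs : List Char) (od : List Char) (j : Nat) : List Char :=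
  if j < cs.length ∧ od.length < 3 ∧ isOct (cs.getD j ' ') = true then
    octLoop cs (od ++ [cs.getD j ' ']) (j + 1)
  else od
termination_by cs.length - j
decreasing_by omega

-- A's outer while loop over index i with accumulator `result`
def aGo (cs : List Char) (res : List Char) (i : Nat) : List Char :=
  if _hi : i < cs.length then
    -- char = text[i]; next_char = text[i+1]; od = the octal digits collected by the inner loop,
    -- after which Python's j equals i + 2 + od.length
    if cs.getD i ' ' ≠ '\\' then aGo cs (res ++ [cs.getD i ' ']) (i + 1)
    else if i + 1 ≥ cs.length then aGo cs (res ++ ['\\']) (i + 1)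
    else
      match escMap (cs.getD (i + 1) ' ') with
      | some r => aGo cs (res ++ [r]) (i + 2)
      | none =>
        if cs.getD (i + 1) ' ' = '0' then
          aGo cs (res ++ [Char.ofNat (octVal 0 (octLoop cs [] (i + 2)))])
            (i + 2 + (octLoop cs [] (i + 2)).length)
        else aGo cs (res ++ ['\\', cs.getD (i + 1) ' ']) (i + 2)
  else res
termination_by cs.length - i
decreasing_by all_goals omega

def process_escapes (text : String) : String := String.ofList (aGo text.toList [] 0)

-- ===== PORT B =====

-- Source B's _MAP (same table literal as A's module constant)
def bMap (c : Char) : Option Char :=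
  if c = '\\' then some '\\'
  else if c = 'a' then some (Char.ofNat 7)
  else if c = 'b' then some (Char.ofNat 8)
  else if c = 'f' then some (Char.ofNat 12)
  else if c = 'n' then some '\n'
  else if c = 'r' then some (Char.ofNat 13)
  else if c = 't' then some '\t'
  else none

-- one step of B's state machine; state = (out, st, val, nd)
def bStep (acc : List Char × Nat × Nat × Nat) (ch : Char) : List Char × Nat × Nat × Nat :=
  let (out, st, val, nd) := acc
  if st = 0 then
    if ch = '\\' then (out, 1, val, nd) else (out ++ [ch], 0, val, nd)
  else if st = 1 then
    match bMap ch with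
    | some r => (out ++ [r], 0, val, nd)
    | none =>
      if ch = '0' then (out, 2, 0, 0)
      else (out ++ ['\\', ch], 0, val, nd)
  else
    if nd < 3 ∧ isOct ch = true then (out, 2, val * 8 + (ch.toNat - 48), nd + 1)
    else
      let out' := out ++ [Char.ofNat val]
      if ch = '\\' then (out', 1, val, nd) else (out' ++ [ch], 0, val, nd)

-- end-of-input flush
def bFinish (acc : List Char × Nat × Nat × Nat) : List Char :=
  let (out, st, val, _) := acc
  if st = 1 then out ++ ['\\']
  else if st = 2 then out ++ [Char.ofNat val]
  else out

def process_escapes_alt (text : String) : String :=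
  String.ofList (bFinish (text.toList.foldl bStep ([], 0, 0, 0)))

-- ===== PRECONDITION & SPEC =====
def Spec_process_escapes (text : String) (out : String) : Prop := out = process_escapes_alt text
instance (text : String) (out : String) : Decidable (Spec_process_escapes text out) := by unfold Spec_process_escapes; infer_instance

-- ===== CLAIM (what is proved, stated in full; the proofs are below) =====
def Claim_equal_process_escapes : Prop := ∀ (text : String), Dom_process_escapes text → Spec_process_escapes text (process_escapes text)

-- ===== LEMMAS AND PROOFS =====

-- take-while-octal, at most k characters
def octTake (k : Nat) (l : List Char) : List Char :=
  match k, l with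
  | 0, _ => []
  | _, [] => []
  | k + 1, c :: cs => if isOct c then c :: octTake k cs else []

lemma octTake_nil (k : Nat) : octTake k [] = [] := by cases k <;> rfl

lemma octLoop_eq : ∀ (n : Nat) (cs : List Char) (j : Nat) (od : List Char), cs.length - j ≤ n →
    octLoop cs od j = od ++ octTake (3 - od.length) (cs.drop j) := by
  intro n
  induction n with
  | zero =>
    intro cs j od h
    rw [octLoop, if_neg (by omega), List.drop_eq_nil_of_le (by omega), octTake_nil,
      List.append_nil]
  | succ n ih =>
    intro cs j od h
    rw [octLoop]
    by_cases hj : j < cs.length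
    · have hdrop : cs.drop j = cs.getD j ' ' :: cs.drop (j + 1) := by
        rw [List.getD_eq_getElem cs ' ' hj]; exact List.drop_eq_getElem_cons hj
      by_cases hlen : od.length < 3
      · by_cases hoc : isOct (cs.getD j ' ') = true
        · rw [if_pos ⟨hj, hlen, hoc⟩, ih cs (j + 1) (od ++ [cs.getD j ' ']) (by omega)]
          obtain ⟨k, hk⟩ : ∃ k, 3 - od.length = k + 1 := ⟨2 - od.length, by omega⟩
          have hk2 : 3 - (od ++ [cs.getD j ' ']).length = k := by
            simp [List.length_append]; omega
          rw [hdrop, hk, hk2]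
          simp only [List.getD] at hoc
          simp [octTake, hoc]
        · rw [if_neg (by tauto), hdrop]
          obtain ⟨k, hk⟩ : ∃ k, 3 - od.length = k + 1 := ⟨2 - od.length, by omega⟩
          simp only [List.getD] at hoc
          simp [hk, octTake, hoc]
      · rw [if_neg (by tauto)]
        have h3 : 3 - od.length = 0 := by omega
        simp [h3, octTake]
    · rw [if_neg (by tauto), List.drop_eq_nil_of_le (by omega), octTake_nil, List.append_nil]

-- the octal-state run of B's fold
lemma bFold_octal : ∀ (rest res : List Char) (v nd : Nat),
    bFinish (List.foldl bStep (res, 2, v, nd) rest) =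
      (match (rest.drop (octTake (3 - nd) rest).length) with
       | [] => res ++ [Char.ofNat (octVal v (octTake (3 - nd) rest))]
       | x :: rest' =>
          bFinish (List.foldl bStep
            (bStep (res ++ [Char.ofNat (octVal v (octTake (3 - nd) rest))], 0,
              octVal v (octTake (3 - nd) rest), nd + (octTake (3 - nd) rest).length) x) rest')) := by
  intro rest
  induction rest with
  | nil =>
    intro res v nd
    simp [octTake_nil, bFinish, octVal]
  | cons x xs ih =>
    intro res v nd
    by_cases hx : nd < 3 ∧ isOct x = true
    · obtain ⟨hnd, hoc⟩ := hx
      obtain ⟨k, hk⟩ : ∃ k, 3 - nd = k + 1 := ⟨2 - nd, by omega⟩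
      have hk2 : 3 - (nd + 1) = k := by omega
      have hstep : bStep (res, 2, v, nd) x = (res, 2, v * 8 + (x.toNat - 48), nd + 1) := by
        simp [bStep, hnd, hoc]
      rw [List.foldl_cons, hstep, ih, hk2, hk]
      have hval : octVal v (x :: octTake k xs) = octVal (v * 8 + (x.toNat - 48)) (octTake k xs) := rfl
      simp only [octTake, hoc, if_pos, List.length_cons, List.drop_succ_cons, hval]
      rw [show nd + ((octTake k xs).length + 1) = nd + 1 + (octTake k xs).length from by omega]
    · have hd : octTake (3 - nd) (x :: xs) = [] := by
        rcases Nat.lt_or_ge nd 3 with h3 | h3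
        · obtain ⟨k, hk⟩ : ∃ k, 3 - nd = k + 1 := ⟨2 - nd, by omega⟩
          have hoc : ¬ isOct x = true := fun hc => hx ⟨h3, hc⟩
          simp [hk, octTake, hoc]
        · have h0 : 3 - nd = 0 := by omega
          simp [h0, octTake]
      have hstep : bStep (res, 2, v, nd) x = bStep (res ++ [Char.ofNat v], 0, v, nd) x := by
        by_cases hb : x = '\\'
        · subst hb; simp [bStep, show isOct '\\' = false from by decide]
        · simp [bStep, hx, hb]
      rw [List.foldl_cons, hstep, hd]
      simp [octVal]

lemma main_eq : ∀ (n : Nat) (cs res : List Char) (i v nd : Nat), cs.length - i ≤ n →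
    aGo cs res i = bFinish ((cs.drop i).foldl bStep (res, 0, v, nd)) := by
  intro n
  induction n with
  | zero =>
    intro cs res i v nd h
    rw [aGo, dif_neg (by omega), List.drop_eq_nil_of_le (by omega)]
    simp [bFinish]
  | succ n ih =>
    intro cs res i v nd h
    by_cases hi : i < cs.length
    · have hdrop : cs.drop i = cs.getD i ' ' :: cs.drop (i + 1) := by
        rw [List.getD_eq_getElem cs ' ' hi]; exact List.drop_eq_getElem_cons hi
      rw [aGo, dif_pos hi]
      by_cases hc : cs.getD i ' ' = '\\'
      · rw [if_neg (not_not_intro hc)]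
        by_cases h1 : cs.length ≤ i + 1
        · rw [if_pos (by omega), ih cs (res ++ ['\\']) (i + 1) v nd (by omega),
            List.drop_eq_nil_of_le h1, hdrop, hc, List.drop_eq_nil_of_le h1, List.foldl_cons]
          have e1 : bStep (res, 0, v, nd) '\\' = (res, 1, v, nd) := by simp [bStep]
          rw [e1]
          simp [bFinish]
        · rw [if_neg (by omega)]
          have h1' : i + 1 < cs.length := by omega
          have hdrop2 : cs.drop (i + 1) = cs.getD (i + 1) ' ' :: cs.drop (i + 2) := by
            rw [List.getD_eq_getElem cs ' ' h1']
            have h2 := List.drop_eq_getElem_cons h1'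
            rw [show i + 1 + 1 = i + 2 from rfl] at h2
            exact h2
          have e1 : bStep (res, 0, v, nd) '\\' = (res, 1, v, nd) := by simp [bStep]
          cases he : escMap (cs.getD (i + 1) ' ') with
          | some r =>
            simp only []
            rw [ih cs (res ++ [r]) (i + 2) v nd (by omega), hdrop, hc, hdrop2,
              List.foldl_cons, List.foldl_cons, e1]
            have e2 : bStep (res, 1, v, nd) (cs.getD (i + 1) ' ') = (res ++ [r], 0, v, nd) := by
              have hbm2 : bMap (cs.getD (i + 1) ' ') = some r := he
              simp only [List.getD] at hbm2
              simp [bStep, hbm2]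
            rw [e2]
          | none =>
            simp only []
            have hbm : bMap (cs.getD (i + 1) ' ') = none := he
            by_cases h0 : cs.getD (i + 1) ' ' = '0'
            · rw [if_pos h0]
              have hod : octLoop cs [] (i + 2) = octTake 3 (cs.drop (i + 2)) := by
                simpa using octLoop_eq cs.length cs (i + 2) [] (by omega)
              rw [hod, hdrop, hc, hdrop2, h0, List.foldl_cons, List.foldl_cons, e1]
              have e2 : bStep (res, 1, v, nd) '0' = (res, 2, 0, 0) := by
                simp [bStep, show bMap '0' = none from by decide]
              rw [e2, bFold_octal]
              simp only [Nat.sub_zero, Nat.zero_add, List.drop_drop]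
              cases hr : cs.drop (i + 2 + (octTake 3 (cs.drop (i + 2))).length) with
              | nil =>
                rw [aGo, dif_neg (by have := List.drop_eq_nil_iff.mp hr; omega)]
              | cons x rest' =>
                rw [ih cs (res ++ [Char.ofNat (octVal 0 (octTake 3 (cs.drop (i + 2))))])
                    (i + 2 + (octTake 3 (cs.drop (i + 2))).length)
                    (octVal 0 (octTake 3 (cs.drop (i + 2))))
                    ((octTake 3 (cs.drop (i + 2))).length) (by omega), hr, List.foldl_cons]
            · rw [if_neg h0, ih cs (res ++ ['\\', cs.getD (i + 1) ' ']) (i + 2) v nd (by omega),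
                hdrop, hc, hdrop2, List.foldl_cons, List.foldl_cons, e1]
              have e2 : bStep (res, 1, v, nd) (cs.getD (i + 1) ' ') =
                  (res ++ ['\\', cs.getD (i + 1) ' '], 0, v, nd) := by
                have hbm2 := hbm; have h02 := h0
                simp only [List.getD] at hbm2 h02
                simp [bStep, hbm2, h02]
              rw [e2]
      · rw [if_pos hc, ih cs (res ++ [cs.getD i ' ']) (i + 1) v nd (by omega), hdrop,
          List.foldl_cons]
        have e0 : bStep (res, 0, v, nd) (cs.getD i ' ') = (res ++ [cs.getD i ' '], 0, v, nd) := by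
          have hc2 := hc
          simp only [List.getD] at hc2
          simp [bStep, hc2]
        rw [e0]
    · rw [aGo, dif_neg hi, List.drop_eq_nil_of_le (by omega)]
      simp [bFinish]

-- ===== VERDICT (by name: the statement is the Claim_ definition above) =====
theorem process_escapes_spec : Claim_equal_process_escapes := by
  intro text _
  unfold Spec_process_escapes process_escapes process_escapes_alt
  exact congrArg String.ofList (by simpa using main_eq text.toList.length text.toList [] 0 0 0 (by omega))
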